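-- pv_equiv track=rewrite | github.com/tianguolangzi/DSBS | DSBS.py | vcf2annovar
-- ===== SOURCE A (Python) =====
-- def vcf2annovar(start0,end0,ref0,alt0):
--     # AAC>A ==> AC>-
--     minL = min(len(ref0),len(alt0))
--     maxL = max(len(ref0),len(alt0))
--     for i0 in range(minL):
--         if ref0[0]==alt0[0]:
--             ref0 = ref0[1:]
--             alt0 = alt0[1:]
--             start0 += 1
--         else:
--             break
--     # GC>TC ==> G>T
--     minL = min(len(ref0),len(alt0))
--     maxL = max(len(ref0),len(alt0))
--     for i0 in range(minL):
--         if ref0[-1]==alt0[-1]: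
--             ref0 = ref0[:-1]
--             alt0 = alt0[:-1]
--     if ref0=="":
--         ref0 = "-"
--         start0 -= 1
--     if alt0=="": alt0 = "-"
--     end0 = start0+len(ref0)-1
--     return(start0,end0,ref0,alt0)
-- ===== SOURCE B (Python) =====
-- def vcf2annovar(start0, end0, ref0, alt0):
--     # O(L) two-pointer: count common prefix, then common suffix of the remainders, slice once.
--     p = 0
--     m = min(len(ref0), len(alt0))
--     while p < m and ref0[p] == alt0[p]:
--         p += 1
--     ref1, alt1 = ref0[p:], alt0[p:]
--     s = 0
--     q = m - p
--     while s < q and ref1[-1 - s] == alt1[-1 - s]: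
--         s += 1
--     ref1 = ref1[:len(ref1) - s]
--     alt1 = alt1[:len(alt1) - s]
--     start0 += p
--     if not ref1:
--         ref1 = "-"
--         start0 -= 1
--     if not alt1:
--         alt1 = "-"
--     return (start0, start0 + len(ref1) - 1, ref1, alt1)
-- ===== Notes on version B (the rewrite author's own statement) =====
-- stated objective: faster
-- what changed: A repeatedly re-slices ref/alt one character at a time in two loops (quadratic copying); B counts the common prefix and bounded common suffix with two index scans and slices each string once.
import Mathlib
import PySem

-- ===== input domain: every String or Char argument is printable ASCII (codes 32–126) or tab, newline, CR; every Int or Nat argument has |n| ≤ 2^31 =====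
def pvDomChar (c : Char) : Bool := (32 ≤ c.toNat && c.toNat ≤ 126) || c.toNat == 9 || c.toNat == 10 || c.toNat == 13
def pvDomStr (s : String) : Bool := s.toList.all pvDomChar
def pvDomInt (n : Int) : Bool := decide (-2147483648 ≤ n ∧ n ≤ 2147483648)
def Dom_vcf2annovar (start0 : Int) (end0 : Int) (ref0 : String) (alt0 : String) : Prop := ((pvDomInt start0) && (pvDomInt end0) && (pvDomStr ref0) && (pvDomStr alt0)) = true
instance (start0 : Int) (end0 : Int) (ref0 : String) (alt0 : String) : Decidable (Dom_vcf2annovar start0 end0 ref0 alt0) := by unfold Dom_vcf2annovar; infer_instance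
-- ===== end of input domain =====

-- B replaces A's quadratic strip-one-char-per-iteration loops by a two-pointer prefix/suffix
-- count and a single slice (objective: faster, asymptotic O(L) vs O(L^2)). Return value only.

-- ===== PORT A =====
-- first loop: `for i0 in range(minL): if ref0[0]==alt0[0]: strip heads, start0 += 1 else break`.
-- ref0[0]/alt0[0] via PySem.List.pyGet?; the `| _, _` arm (IndexError) is unreachable: the fuel
-- is the min of the lengths, so both lists stay nonempty while fuel remains.
def pvALoop1 : Nat → List Char → List Char → Int → List Char × List Char × Int
  | 0, r, a, s => (r, a, s)
  | n + 1, r, a, s =>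
    match PySem.List.pyGet? r 0, PySem.List.pyGet? a 0 with
    | some c, some d =>
      if c = d then
        pvALoop1 n (PySem.List.slice r (some 1) none) (PySem.List.slice a (some 1) none) (s + 1)
      else (r, a, s)
    | _, _ => (r, a, s)

-- second loop: `for i0 in range(minL): if ref0[-1]==alt0[-1]: strip last chars` (no break:
-- on a non-match the loop keeps running with unchanged state). Same unreachable `| _, _` arm.
def pvALoop2 : Nat → List Char → List Char → List Char × List Char
  | 0, r, a => (r, a)
  | n + 1, r, a =>
    match PySem.List.pyGet? r (-1), PySem.List.pyGet? a (-1) with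
    | some c, some d =>
      if c = d then
        pvALoop2 n (PySem.List.slice r none (some (-1))) (PySem.List.slice a none (some (-1)))
      else pvALoop2 n r a
    | _, _ => (r, a)

def vcf2annovar (start0 : Int) (end0 : Int) (ref0 : String) (alt0 : String) : Int × Int × String × String :=
  let r0 := ref0.toList
  let a0 := alt0.toList
  let (r1, a1, s1) := pvALoop1 (min r0.length a0.length) r0 a0 start0
  let (r2, a2) := pvALoop2 (min r1.length a1.length) r1 a1
  let (r3, s3) := if r2 = [] then (['-'], s1 - 1) else (r2, s1)
  let a3 := if a2 = [] then ['-'] else a2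
  let e3 := s3 + (r3.length : Int) - 1
  (s3, e3, String.ofList r3, String.ofList a3)

-- ===== PORT B =====
-- `while p < m and ref0[p] == alt0[p]: p += 1` — a left-to-right scan of both strings in step,
-- i.e. the length of the common prefix (the p < m bound is implied by running off either list).
def pvLcp : List Char → List Char → Nat
  | c :: r, d :: a => if c = d then pvLcp r a + 1 else 0
  | _, _ => 0

-- `while s < q and ref1[-1-s] == alt1[-1-s]: s += 1` — indexing from the back is a scan of the
-- reversed strings, cut off at the explicit bound q (the fuel argument).
def pvLcsB : Nat → List Char → List Char → Nat
  | n + 1, c :: r, d :: a => if c = d then pvLcsB n r a + 1 else 0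
  | _, _, _ => 0

def vcf2annovar_alt (start0 : Int) (end0 : Int) (ref0 : String) (alt0 : String) : Int × Int × String × String :=
  let r0 := ref0.toList
  let a0 := alt0.toList
  let m := min r0.length a0.length
  let p := pvLcp r0 a0
  let r1 := r0.drop p
  let a1 := a0.drop p
  let s := pvLcsB (m - p) r1.reverse a1.reverse
  let r2 := r1.take (r1.length - s)
  let a2 := a1.take (a1.length - s)
  let s1 := start0 + (p : Int)
  let (r3, s3) := if r2 = [] then (['-'], s1 - 1) else (r2, s1)
  let a3 := if a2 = [] then ['-'] else a2
  (s3, s3 + (r3.length : Int) - 1, String.ofList r3, String.ofList a3)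

-- ===== PRECONDITION & SPEC =====
def Spec_vcf2annovar (start0 : Int) (end0 : Int) (ref0 : String) (alt0 : String) (out : Int × Int × String × String) : Prop := out = vcf2annovar_alt start0 end0 ref0 alt0
instance (start0 : Int) (end0 : Int) (ref0 : String) (alt0 : String) (out : Int × Int × String × String) : Decidable (Spec_vcf2annovar start0 end0 ref0 alt0 out) := by unfold Spec_vcf2annovar; infer_instance

-- ===== CLAIM (what is proved, stated in full; the proofs are below) =====
def Claim_equal_vcf2annovar : Prop := ∀ (start0 : Int) (end0 : Int) (ref0 : String) (alt0 : String), Dom_vcf2annovar start0 end0 ref0 alt0 → Spec_vcf2annovar start0 end0 ref0 alt0 (vcf2annovar start0 end0 ref0 alt0)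

-- ===== LEMMAS AND PROOFS =====

lemma pvLcp_le (r a : List Char) : pvLcp r a ≤ min r.length a.length := by
  induction r generalizing a with
  | nil => simp [pvLcp]
  | cons c r ih =>
    cases a with
    | nil => simp [pvLcp]
    | cons d a =>
      by_cases h : c = d <;> simp [pvLcp, h]
      have := ih a; omega

lemma loop1_eq (r a : List Char) (s : Int) :
    pvALoop1 (min r.length a.length) r a s =
      (r.drop (pvLcp r a), a.drop (pvLcp r a), s + (pvLcp r a : Int)) := by
  induction r generalizing a s with
  | nil => simp [pvALoop1, pvLcp]
  | cons c r ih =>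
    cases a with
    | nil => simp [pvALoop1, pvLcp]
    | cons d a =>
      have hmin : min (c :: r).length (d :: a).length = min r.length a.length + 1 := by
        simp [List.length_cons]
      rw [hmin]
      by_cases h : c = d
      · simp only [pvALoop1, PySem.List.pyGet?, PySem.List.pyIdx?]
        simp [h, pvLcp, PySem.List.slice_from_one, ih]
        ring
      · simp only [pvALoop1, PySem.List.pyGet?, PySem.List.pyIdx?]
        simp [h, pvLcp]

lemma pyGet_last_nil : PySem.List.pyGet? ([] : List Char) (-1) = none := by decide

lemma pyGet_last_reverse_cons (c : Char) (u : List Char) :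
    PySem.List.pyGet? (c :: u).reverse (-1) = some c := by
  simp [PySem.List.pyGet?, PySem.List.pyIdx?]

lemma slice_dropLast_reverse_cons (c : Char) (u : List Char) :
    PySem.List.slice ((c :: u).reverse) none (some (-1)) = u.reverse := by
  simp [PySem.List.slice_to_neg_one]

-- once the last characters differ, A's second loop never changes the state again
lemma loop2_stuck (n : Nat) (r a : List Char) (c d : Char)
    (hr : PySem.List.pyGet? r (-1) = some c) (ha : PySem.List.pyGet? a (-1) = some d)
    (hne : c ≠ d) : pvALoop2 n r a = (r, a) := by
  induction n with
  | zero => rfl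
  | succ n ih =>
    simp only [pvALoop2, hr, ha]
    have : ¬ c = d := hne
    simp [this, ih]

lemma loop2_eq (n : Nat) (u v : List Char) :
    pvALoop2 n u.reverse v.reverse =
      ((u.drop (pvLcsB n u v)).reverse, (v.drop (pvLcsB n u v)).reverse) := by
  induction n generalizing u v with
  | zero => simp [pvALoop2, pvLcsB]
  | succ n ih =>
    cases u with
    | nil => simp [pvALoop2, pvLcsB, pyGet_last_nil]
    | cons c u =>
      cases v with
      | nil => simp [pvALoop2, pvLcsB, pyGet_last_nil]
      | cons d v =>
        by_cases h : c = d
        · simp only [pvALoop2, pyGet_last_reverse_cons, slice_dropLast_reverse_cons]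
          simp only [h]
          simp [ih, pvLcsB]
        · rw [loop2_stuck (n + 1) _ _ c d (pyGet_last_reverse_cons c u)
            (pyGet_last_reverse_cons d v) h]
          simp [pvLcsB, h]

lemma drop_eq_take_reverse (l : List Char) (k : Nat) :
    (l.reverse.drop k).reverse = l.take (l.length - k) := by
  simp [List.drop_reverse]

-- ===== VERDICT (by name: the statement is the Claim_ definition above) =====
theorem vcf2annovar_spec : Claim_equal_vcf2annovar := by
  intro start0 end0 ref0 alt0 _
  show vcf2annovar start0 end0 ref0 alt0 = vcf2annovar_alt start0 end0 ref0 alt0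
  simp only [vcf2annovar, vcf2annovar_alt]
  rw [loop1_eq]
  have hple := pvLcp_le ref0.toList alt0.toList
  have hmin : min (ref0.toList.drop (pvLcp ref0.toList alt0.toList)).length
      (alt0.toList.drop (pvLcp ref0.toList alt0.toList)).length =
      min ref0.toList.length alt0.toList.length - pvLcp ref0.toList alt0.toList := by
    simp [List.length_drop]; omega
  rw [hmin]
  have h2 := loop2_eq (min ref0.toList.length alt0.toList.length - pvLcp ref0.toList alt0.toList)
      (ref0.toList.drop (pvLcp ref0.toList alt0.toList)).reverse
      (alt0.toList.drop (pvLcp ref0.toList alt0.toList)).reverse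
  simp only [List.reverse_reverse] at h2
  rw [h2]
  simp only [drop_eq_take_reverse]
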